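-- pv_equiv track=rewrite | github.com/alexandraback/datacollection | solutions_5636311922769920_0/Python/farin/d.py | solve
-- ===== SOURCE A (Python) =====
-- def solve(k, c, s):
--     res = []
--     for pos in range(1, k+1):
--         sm = 0
--         for i in range(0, c):
--             sm += k**i
--         r = sm * (pos-1)
--         res.append(str(r+1))
--     return ' '.join(res)
-- ===== SOURCE B (Python) =====
-- def solve(k, c, s):
--     if k <= 0:
--         return ''
--     n = max(c, 0)
--     sm = n if k == 1 else (k**n - 1) // (k - 1)
--     return ' '.join(str(sm * (pos - 1) + 1) for pos in range(1, k + 1))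
-- ===== Notes on version B (the rewrite author's own statement) =====
-- stated objective: alternative
-- what changed: Replaces A's per-position inner accumulation loop over range(c) with the geometric-series closed form (k**c - 1)//(k-1) (c for k==1) computed once, then maps it over the positions.
import Mathlib
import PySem

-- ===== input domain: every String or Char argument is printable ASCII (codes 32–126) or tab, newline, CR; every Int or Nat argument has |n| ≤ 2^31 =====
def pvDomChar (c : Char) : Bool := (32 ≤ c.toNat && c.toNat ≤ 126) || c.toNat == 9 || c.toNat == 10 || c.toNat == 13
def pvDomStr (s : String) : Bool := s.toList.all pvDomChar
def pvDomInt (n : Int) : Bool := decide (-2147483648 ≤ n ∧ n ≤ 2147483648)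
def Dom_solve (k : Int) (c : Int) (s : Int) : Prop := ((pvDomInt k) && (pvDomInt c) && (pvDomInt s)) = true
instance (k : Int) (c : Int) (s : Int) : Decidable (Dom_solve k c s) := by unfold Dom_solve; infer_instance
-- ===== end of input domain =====

-- B replaces A's per-position accumulation loop over range(c) by the geometric-series
-- closed form computed once; return values are identical on all inputs.

-- ===== PORT A =====
def solve (k : Int) (c : Int) (s : Int) : String :=
  let res : List String :=
    (PySem.List.pyRange 1 (k + 1) 1).foldl (fun res pos =>
      let sm : Int := (PySem.List.pyRange 0 c 1).foldl (fun sm i => sm + k ^ i.toNat) 0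
      let r := sm * (pos - 1)
      res ++ [PySem.Int.toStr (r + 1)]) []
  PySem.Str.join " " res

-- ===== PORT B =====
def solve_alt (k : Int) (c : Int) (s : Int) : String :=
  if k ≤ 0 then "" else
    let n : Int := max c 0
    let sm : Int := if k = 1 then n else PySem.Int.floordiv (k ^ n.toNat - 1) (k - 1)
    PySem.Str.join " " ((PySem.List.pyRange 1 (k + 1) 1).map (fun pos => PySem.Int.toStr (sm * (pos - 1) + 1)))

-- ===== PRECONDITION & SPEC =====
def Spec_solve (k : Int) (c : Int) (s : Int) (out : String) : Prop := out = solve_alt k c s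
instance (k : Int) (c : Int) (s : Int) (out : String) : Decidable (Spec_solve k c s out) := by unfold Spec_solve; infer_instance

-- ===== CLAIM (what is proved, stated in full; the proofs are below) =====
def Claim_equal_solve : Prop := ∀ (k : Int) (c : Int) (s : Int), Dom_solve k c s → Spec_solve k c s (solve k c s)

-- ===== LEMMAS AND PROOFS =====

-- A's inner loop over range(0, c) computes the geometric sum ∑_{i<n} k^i with n = (max c 0).toNat.
theorem innerSum_eq_geomSum (k c : Int) :
    (PySem.List.pyRange 0 c 1).foldl (fun sm i => sm + k ^ i.toNat) 0
      = ∑ i ∈ Finset.range (max c 0).toNat, k ^ i := by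
  rcases le_or_gt c 0 with h | h
  · rw [PySem.List.pyRange_one_eq_nil (by omega)]
    simp [Int.toNat_of_nonpos (by omega : max c 0 ≤ 0)]
  · obtain ⟨n, rfl⟩ : ∃ n : Nat, c = (n : Int) := ⟨c.toNat, (Int.toNat_of_nonneg h.le).symm⟩
    have key : ∀ (m : Nat) (init : Int),
        (PySem.List.pyRange 0 (m : Int) 1).foldl (fun sm i => sm + k ^ i.toNat) init
          = init + ∑ i ∈ Finset.range m, k ^ i := by
      intro m
      induction m with
      | zero => intro init; simp [PySem.List.pyRange_one_eq_nil]
      | succ m ih =>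
        intro init
        have : ((m : Int) + 1) = ((m + 1 : Nat) : Int) := by push_cast; ring
        rw [show ((m + 1 : Nat) : Int) = (m : Int) + 1 by push_cast; ring,
          PySem.List.pyRange_one_succ_right (by positivity), List.foldl_append, ih]
        simp [Finset.sum_range_succ, add_assoc]
    have hmax : (max ((n : Nat) : Int) 0).toNat = n := by omega
    rw [key n 0, zero_add, hmax]

-- the geometric sum equals B's closed form
theorem geomSum_eq_closed (k : Int) (n : Nat) (hk : k ≠ 1) :
    (∑ i ∈ Finset.range n, k ^ i) = PySem.Int.floordiv (k ^ n - 1) (k - 1) := by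
  have hmul : (∑ i ∈ Finset.range n, k ^ i) * (k - 1) = k ^ n - 1 := geom_sum_mul k n
  rw [← hmul]
  unfold PySem.Int.floordiv
  rw [Int.mul_fdiv_cancel _ (by omega : k - 1 ≠ 0)]

theorem foldl_append_str (g : Int → String) :
    ∀ (l : List Int) (init : List String),
      l.foldl (fun r x => r ++ [g x]) init = init ++ l.map g := by
  intro l
  induction l with
  | nil => simp
  | cons x xs ih => intro init; simp [ih]

-- ===== VERDICT (by name: the statement is the Claim_ definition above) =====
theorem solve_spec : Claim_equal_solve := by
  intro k c s _
  simp only [Spec_solve, solve, solve_alt]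
  rcases le_or_gt k 0 with hk | hk
  · rw [if_pos hk,
      show PySem.List.pyRange 1 (k + 1) 1 = [] from PySem.List.pyRange_one_eq_nil (by omega)]
    simp [PySem.Str.join]
  · rw [if_neg (by omega)]
    rw [foldl_append_str, List.nil_append]
    congr 1
    apply List.map_congr_left
    intro pos _
    rw [innerSum_eq_geomSum]
    by_cases h1 : k = 1
    · rw [if_pos h1]
      subst h1
      simp [Int.toNat_of_nonneg (le_max_right c 0)]
    · rw [if_neg h1, geomSum_eq_closed k _ h1]
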